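-- pv_equiv track=rewrite | github.com/dogbuddy2010/Data-bank | DATABANK.PY | password_strength_issues
-- ===== SOURCE A (Python) =====
-- def password_strength_issues(password: str) -> list[str]:
--     issues: list[str] = []
--     if len(password) < 8:
--         issues.append("at least 8 characters")
--     if not any(ch.islower() for ch in password):
--         issues.append("one lowercase letter")
--     if not any(ch.isupper() for ch in password):
--         issues.append("one uppercase letter")
--     if not any(ch.isdigit() for ch in password):
--         issues.append("one number")
--     if not any(not ch.isalnum() for ch in password):
--         issues.append("one symbol")
--     return issues
-- ===== SOURCE B (Python) =====
-- def password_strength_issues(password: str) -> list[str]: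
--     has_lower = has_upper = has_digit = has_symbol = False
--     for ch in password:
--         if ch.islower():
--             has_lower = True
--         if ch.isupper():
--             has_upper = True
--         if ch.isdigit():
--             has_digit = True
--         if not ch.isalnum():
--             has_symbol = True
--     issues: list[str] = []
--     if len(password) < 8:
--         issues.append("at least 8 characters")
--     if not has_lower:
--         issues.append("one lowercase letter")
--     if not has_upper:
--         issues.append("one uppercase letter")
--     if not has_digit:
--         issues.append("one number")
--     if not has_symbol:
--         issues.append("one symbol")
--     return issues
-- ===== Notes on version B (the rewrite author's own statement) =====
-- stated objective: faster
-- what changed: Replaced four separate any()-scans over the password with a single loop maintaining four booleans, then assembling the issue list from the flags.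
import Mathlib
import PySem

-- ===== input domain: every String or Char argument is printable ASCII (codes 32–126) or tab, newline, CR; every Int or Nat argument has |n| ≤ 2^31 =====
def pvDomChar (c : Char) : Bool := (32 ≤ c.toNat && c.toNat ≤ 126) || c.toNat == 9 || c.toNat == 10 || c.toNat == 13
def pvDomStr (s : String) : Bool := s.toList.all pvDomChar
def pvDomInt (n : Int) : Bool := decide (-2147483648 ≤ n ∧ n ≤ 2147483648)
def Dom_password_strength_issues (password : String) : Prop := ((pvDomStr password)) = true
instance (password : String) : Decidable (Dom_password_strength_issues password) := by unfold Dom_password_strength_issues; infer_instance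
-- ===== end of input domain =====

-- B merges A's four any()-scans into one loop over the string maintaining four booleans (constant-factor speedup).

-- ===== PORT A =====
def password_strength_issues (password : String) : List String :=
  let cs := password.toList
  let issues : List String := []
  let issues := if (PySem.Str.len password) < 8 then issues ++ ["at least 8 characters"] else issues
  let issues := if ¬ (cs.any (fun ch => PySem.Chars.islower ch)) then issues ++ ["one lowercase letter"] else issues
  let issues := if ¬ (cs.any (fun ch => PySem.Chars.isupper ch)) then issues ++ ["one uppercase letter"] else issues
  let issues := if ¬ (cs.any (fun ch => PySem.Chars.isdigit ch)) then issues ++ ["one number"] else issues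
  let issues := if ¬ (cs.any (fun ch => ! PySem.Chars.isalnum ch)) then issues ++ ["one symbol"] else issues
  issues

-- ===== PORT B =====
def password_strength_issues_alt (password : String) : List String :=
  let flags := password.toList.foldl
    (fun (st : Bool × Bool × Bool × Bool) ch =>
      (st.1 || PySem.Chars.islower ch,
       st.2.1 || PySem.Chars.isupper ch,
       st.2.2.1 || PySem.Chars.isdigit ch,
       st.2.2.2 || ! PySem.Chars.isalnum ch))
    (false, false, false, false)
  let issues : List String := []
  let issues := if (PySem.Str.len password) < 8 then issues ++ ["at least 8 characters"] else issues
  let issues := if ¬ flags.1 then issues ++ ["one lowercase letter"] else issues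
  let issues := if ¬ flags.2.1 then issues ++ ["one uppercase letter"] else issues
  let issues := if ¬ flags.2.2.1 then issues ++ ["one number"] else issues
  let issues := if ¬ flags.2.2.2 then issues ++ ["one symbol"] else issues
  issues

-- ===== PRECONDITION & SPEC =====
def Spec_password_strength_issues (password : String) (out : List String) : Prop := out = password_strength_issues_alt password
instance (password : String) (out : List String) : Decidable (Spec_password_strength_issues password out) := by unfold Spec_password_strength_issues; infer_instance

-- ===== CLAIM (what is proved, stated in full; the proofs are below) =====
def Claim_equal_password_strength_issues : Prop := ∀ (password : String), Dom_password_strength_issues password → Spec_password_strength_issues password (password_strength_issues password)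

-- ===== LEMMAS AND PROOFS =====
theorem pv_flags_foldl (cs : List Char) (a b c d : Bool) :
    cs.foldl
      (fun (st : Bool × Bool × Bool × Bool) ch =>
        (st.1 || PySem.Chars.islower ch,
         st.2.1 || PySem.Chars.isupper ch,
         st.2.2.1 || PySem.Chars.isdigit ch,
         st.2.2.2 || ! PySem.Chars.isalnum ch))
      (a, b, c, d)
    = (a || cs.any (fun ch => PySem.Chars.islower ch),
       b || cs.any (fun ch => PySem.Chars.isupper ch),
       c || cs.any (fun ch => PySem.Chars.isdigit ch),
       d || cs.any (fun ch => ! PySem.Chars.isalnum ch)) := by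
  induction cs generalizing a b c d with
  | nil => simp
  | cons x xs ih => simp [List.foldl, ih, Bool.or_assoc]

-- ===== VERDICT (by name: the statement is the Claim_ definition above) =====
theorem password_strength_issues_spec : Claim_equal_password_strength_issues := by
  intro password _
  unfold Spec_password_strength_issues password_strength_issues password_strength_issues_alt
  simp only [pv_flags_foldl, Bool.false_or]
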